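-- pv_equiv track=rewrite | github.com/ArthurFariaz/Desafio-syngenta | src/my_module.py | get_cheapest_hotel
-- ===== SOURCE A (Python) =====
-- def get_cheapest_hotel(number):   #DO NOT change the function's name
--     cheapest_hotel = "cheapest_hotel_name"
--
--     PriceLakeRegular = [110,90]       # Putting prices for days of the week and weekends for regurlars's of Lakewood
--     PriceLakeRewards = [80,80]        # Putting prices for days of the week and weekends for rewards's of Lakewood
--
--     PriceBridgRegular = [160,60]      # the same above, but in Bridgewood
--     PriceBridgRewards = [110,50]
--
--     PriceRidgRegular = [220,150]      # the same above, but in Ridgewood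
--     PriceRidgRewards = [100,40]
--
--     days = number.split() # Pick up the information about the number of days ...
--
--     if ( days[0] == "Regular:"):    #checking if the customer is a regular or a rewards
--         TypeClient = "Regular"
--     else:
--         TypeClient = "Rewards"
--
--     account1 = 0      # The account/bill for stay in the Lakewood
--     account2 = 0      # The account/bill for stay in the Bridgewood
--     account3 = 0      # The account/bill for stay in the Ridgewood
--
--     for day in days:       # Calculating the price for the days
--         if "mon" in day or "tues" in day or "wed" in day or "thur" in day or "fri" in day:
--             if TypeClient == "Regular":
--                 account1 = account1 + PriceLakeRegular[0]
--                 account2 = account2 + PriceBridgRegular[0]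
--                 account3 = account3 + PriceRidgRegular[0]
--             else:
--                 account1 = account1 + PriceLakeRewards[0]
--                 account2 = account2 + PriceBridgRewards[0]
--                 account3 = account3 + PriceRidgRewards[0]
--
--         if "sat" in day or "sun" in day:
--             if TypeClient == "Regular":
--                 account1 = account1 + PriceLakeRegular[1]
--                 account2 = account2 + PriceBridgRegular[1]
--                 account3 = account3 + PriceRidgRegular[1]
--             else:
--                 account1 = account1 + PriceLakeRewards[1]
--                 account2 = account2 + PriceBridgRewards[1]
--                 account3 = account3 + PriceRidgRewards[1]
--
--     # Looking for the best place to stay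
--     if (account1 < account2 and account1 < account3):
--         cheapest_hotel = "Lakewood"
--
--     if (account1 < account2 and account3 <= account1):
--         cheapest_hotel = "Ridgewood"
--
--     if (account2 < account1 and account2 < account3):
--         cheapest_hotel = "Bridgewood"
--
--     if (account2 < account1 and account3 <= account2):
--         cheapest_hotel = "Ridgewood"
--
--
--
--     return cheapest_hotel
-- ===== SOURCE B (Python) =====
-- def get_cheapest_hotel(number):
--     days = number.split()
--     is_regular = days[0] == "Regular:"
--     wk = sum(1 for d in days
--              if "mon" in d or "tues" in d or "wed" in d or "thur" in d or "fri" in d)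
--     we = sum(1 for d in days if "sat" in d or "sun" in d)
--     if is_regular:
--         (l0, l1), (b0, b1), (r0, r1) = (110, 90), (160, 60), (220, 150)
--     else:
--         (l0, l1), (b0, b1), (r0, r1) = (80, 80), (110, 50), (100, 40)
--     a1 = wk * l0 + we * l1
--     a2 = wk * b0 + we * b1
--     a3 = wk * r0 + we * r1
--     if a1 < a2:
--         return "Lakewood" if a1 < a3 else "Ridgewood"
--     if a2 < a1:
--         return "Bridgewood" if a2 < a3 else "Ridgewood"
--     return "cheapest_hotel_name"
-- ===== Notes on version B (the rewrite author's own statement) =====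
-- stated objective: simpler
-- what changed: Counts weekday- and weekend-matching tokens once and multiplies by the per-hotel price pair instead of accumulating three running bills in the loop, and replaces the four-if overwrite cascade with a direct three-way comparison.
import Mathlib
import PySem

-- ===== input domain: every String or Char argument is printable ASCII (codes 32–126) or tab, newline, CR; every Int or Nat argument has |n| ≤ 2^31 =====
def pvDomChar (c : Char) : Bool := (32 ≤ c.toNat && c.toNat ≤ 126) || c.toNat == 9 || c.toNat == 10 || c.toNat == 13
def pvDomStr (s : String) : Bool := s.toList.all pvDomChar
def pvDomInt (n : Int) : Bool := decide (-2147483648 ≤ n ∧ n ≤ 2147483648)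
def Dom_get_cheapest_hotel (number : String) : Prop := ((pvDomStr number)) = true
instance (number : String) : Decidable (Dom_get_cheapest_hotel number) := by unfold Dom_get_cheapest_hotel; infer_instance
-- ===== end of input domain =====

-- B counts weekday/weekend tokens once and multiplies by the price pair; A accumulates three bills in the loop.

-- shared token predicates (the same substring tests both Pythons perform)
def pvIsWk (d : String) : Bool :=
  PySem.Str.isIn "mon" d || PySem.Str.isIn "tues" d || PySem.Str.isIn "wed" d ||
  PySem.Str.isIn "thur" d || PySem.Str.isIn "fri" d

def pvIsWe (d : String) : Bool :=
  PySem.Str.isIn "sat" d || PySem.Str.isIn "sun" d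

-- ===== PORT A =====
def pvStepA (typeClient : String) (a : Int × Int × Int) (day : String) : Int × Int × Int :=
  let a := if pvIsWk day then
      (if typeClient = "Regular" then (a.1 + 110, a.2.1 + 160, a.2.2 + 220)
       else (a.1 + 80, a.2.1 + 110, a.2.2 + 100))
    else a
  if pvIsWe day then
      (if typeClient = "Regular" then (a.1 + 90, a.2.1 + 60, a.2.2 + 150)
       else (a.1 + 80, a.2.1 + 50, a.2.2 + 40))
    else a

def get_cheapest_hotel (number : String) : String :=
  let cheapest_hotel := "cheapest_hotel_name"
  let days := PySem.Str.split₀ number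
  let typeClient := if PySem.List.pyGetD days 0 "" = "Regular:" then "Regular" else "Rewards"
  let acc := days.foldl (pvStepA typeClient) (0, 0, 0)
  let account1 := acc.1
  let account2 := acc.2.1
  let account3 := acc.2.2
  let cheapest_hotel := if account1 < account2 ∧ account1 < account3 then "Lakewood" else cheapest_hotel
  let cheapest_hotel := if account1 < account2 ∧ account3 ≤ account1 then "Ridgewood" else cheapest_hotel
  let cheapest_hotel := if account2 < account1 ∧ account2 < account3 then "Bridgewood" else cheapest_hotel
  let cheapest_hotel := if account2 < account1 ∧ account3 ≤ account2 then "Ridgewood" else cheapest_hotel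
  cheapest_hotel

-- ===== PORT B =====
def get_cheapest_hotel_alt (number : String) : String :=
  let days := PySem.Str.split₀ number
  let isRegular := PySem.List.pyGetD days 0 "" = "Regular:"
  let wk : Int := (days.countP pvIsWk : Int)
  let we : Int := (days.countP pvIsWe : Int)
  let l0 : Int := if isRegular then 110 else 80
  let l1 : Int := if isRegular then 90 else 80
  let b0 : Int := if isRegular then 160 else 110
  let b1 : Int := if isRegular then 60 else 50
  let r0 : Int := if isRegular then 220 else 100
  let r1 : Int := if isRegular then 150 else 40
  let a1 := wk * l0 + we * l1
  let a2 := wk * b0 + we * b1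
  let a3 := wk * r0 + we * r1
  if a1 < a2 then (if a1 < a3 then "Lakewood" else "Ridgewood")
  else if a2 < a1 then (if a2 < a3 then "Bridgewood" else "Ridgewood")
  else "cheapest_hotel_name"

-- ===== PRECONDITION & SPEC =====
-- Pre_ excludes exactly the inputs whose whitespace-split is empty: there A's days[0] raises IndexError.
def Pre_get_cheapest_hotel (number : String) : Prop := PySem.Str.split₀ number ≠ []
instance (number : String) : Decidable (Pre_get_cheapest_hotel number) := by
  unfold Pre_get_cheapest_hotel; infer_instance

def pvWitness_get_cheapest_hotel : String := "Regular: mon tues sat"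

def Spec_get_cheapest_hotel (number : String) (out : String) : Prop := out = get_cheapest_hotel_alt number
instance (number : String) (out : String) : Decidable (Spec_get_cheapest_hotel number out) := by unfold Spec_get_cheapest_hotel; infer_instance

-- ===== CLAIM (what is proved, stated in full; the proofs are below) =====
def Claim_equal_get_cheapest_hotel : Prop := ∀ (number : String), Dom_get_cheapest_hotel number → Pre_get_cheapest_hotel number → Spec_get_cheapest_hotel number (get_cheapest_hotel number)

-- ===== LEMMAS AND PROOFS =====
lemma stepA_eq (t : String) (x y z : Int) (d : String) :
    pvStepA t (x, y, z) d =
      (x + (if pvIsWk d then (1:Int) else 0) * (if t = "Regular" then 110 else 80)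
         + (if pvIsWe d then (1:Int) else 0) * (if t = "Regular" then 90 else 80),
       y + (if pvIsWk d then (1:Int) else 0) * (if t = "Regular" then 160 else 110)
         + (if pvIsWe d then (1:Int) else 0) * (if t = "Regular" then 60 else 50),
       z + (if pvIsWk d then (1:Int) else 0) * (if t = "Regular" then 220 else 100)
         + (if pvIsWe d then (1:Int) else 0) * (if t = "Regular" then 150 else 40)) := by
  unfold pvStepA
  by_cases hw : pvIsWk d <;> by_cases he : pvIsWe d <;> by_cases ht : t = "Regular" <;>
    simp [hw, he, ht]

lemma foldA (t : String) (l : List String) (x y z : Int) :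
    l.foldl (pvStepA t) (x, y, z) =
      (x + (l.countP pvIsWk : Int) * (if t = "Regular" then 110 else 80)
         + (l.countP pvIsWe : Int) * (if t = "Regular" then 90 else 80),
       y + (l.countP pvIsWk : Int) * (if t = "Regular" then 160 else 110)
         + (l.countP pvIsWe : Int) * (if t = "Regular" then 60 else 50),
       z + (l.countP pvIsWk : Int) * (if t = "Regular" then 220 else 100)
         + (l.countP pvIsWe : Int) * (if t = "Regular" then 150 else 40)) := by
  induction l generalizing x y z with
  | nil => simp
  | cons d l ih =>
    rw [List.foldl_cons, stepA_eq, ih]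
    by_cases ht : t = "Regular" <;> by_cases hw : pvIsWk d <;> by_cases he : pvIsWe d <;>
      simp [ht, hw, he, Prod.ext_iff] <;> omega

-- ===== VERDICT (by name: the statement is the Claim_ definition above) =====
theorem get_cheapest_hotel_spec : Claim_equal_get_cheapest_hotel := by
  intro number _ _
  unfold Spec_get_cheapest_hotel get_cheapest_hotel get_cheapest_hotel_alt
  simp only [foldA]
  by_cases h : PySem.List.pyGetD (PySem.Str.split₀ number) 0 "" = "Regular:" <;>
    simp [h] <;> split_ifs <;> first | rfl | omega
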